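-- pv_equiv track=rewrite | github.com/vinevg1996/milner_attack_for_RM_codes | help.py | mult_vector_for_matrix
-- ===== SOURCE A (Python) =====
-- def mult_vector_for_matrix(vec, matrix):
--     res_vec = list()
--     sum_ceil = 0
--     for j in range(0, len(matrix[0])):
--         for i in range(0, len(vec)):
--             sum_ceil = (sum_ceil + vec[i] * matrix[i][j]) % 2
--         res_vec.append(int(sum_ceil))
--         sum_ceil = 0
--     return res_vec
-- ===== SOURCE B (Python) =====
-- def mult_vector_for_matrix(vec, matrix):
--     # GF(2): the product is the mod-2 sum of the rows whose coefficient is odd.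
--     # Select those rows and fold them into the accumulator with whole-row mod-2
--     # addition; rows with an even coefficient are skipped entirely.
--     acc = [0] * len(matrix[0])
--     for v, row in zip(vec, matrix):
--         if v % 2:
--             acc = [(a + r) % 2 for a, r in zip(acc, row)]
--     return acc
-- ===== Notes on version B (the rewrite author's own statement) =====
-- stated objective: alternative
-- what changed: Instead of computing each output entry by a dot-product loop, B treats the product as a linear combination of rows over GF(2): it folds over zip(vec, matrix), skips rows whose coefficient is even, and adds each selected row into the accumulator vector mod 2 in one whole-row pass; no index arithmetic and no per-entry inner accumulation over all of vec.
import Mathlib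
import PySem

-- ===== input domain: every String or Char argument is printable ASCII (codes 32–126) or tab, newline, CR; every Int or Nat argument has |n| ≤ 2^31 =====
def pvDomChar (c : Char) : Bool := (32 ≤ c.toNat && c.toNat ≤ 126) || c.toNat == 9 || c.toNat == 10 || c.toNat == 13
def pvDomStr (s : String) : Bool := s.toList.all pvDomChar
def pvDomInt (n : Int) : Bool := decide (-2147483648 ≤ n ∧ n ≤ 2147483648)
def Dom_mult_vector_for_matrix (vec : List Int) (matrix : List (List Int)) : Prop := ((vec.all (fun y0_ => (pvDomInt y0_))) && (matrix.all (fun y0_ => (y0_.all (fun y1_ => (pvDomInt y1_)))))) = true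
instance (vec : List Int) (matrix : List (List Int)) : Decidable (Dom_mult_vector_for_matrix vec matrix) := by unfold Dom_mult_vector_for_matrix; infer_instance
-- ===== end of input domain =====

-- B computes the product as a GF(2) linear combination of rows: it folds over zip(vec, matrix),
-- skipping even-coefficient rows and adding each selected row mod 2 into the accumulator;
-- alternative decomposition (no per-entry dot-product loop).

-- ===== PORT A =====
-- Column-at-a-time: for each column j, fold over the rows accumulating a scalar mod 2.
def mult_vector_for_matrix (vec : List Int) (matrix : List (List Int)) : List Int :=
  (PySem.List.pyRange 0 ((PySem.List.pyGetD matrix 0 []).length : Int) 1).foldl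
    (fun res_vec j =>
      res_vec ++ [(PySem.List.pyRange 0 (vec.length : Int) 1).foldl
        (fun sum_ceil i =>
          PySem.Int.mod (sum_ceil + PySem.List.pyGetD vec i 0 *
            PySem.List.pyGetD (PySem.List.pyGetD matrix i []) j 0) 2) 0])
    []

-- ===== PORT B =====
-- Fold over zip(vec, matrix): skip even coefficients, add selected rows mod 2 element-wise.
def mult_vector_for_matrix_alt (vec : List Int) (matrix : List (List Int)) : List Int :=
  (List.zip vec matrix).foldl
    (fun acc vr =>
      if PySem.Int.mod vr.1 2 ≠ 0 then
        (List.zip acc vr.2).map (fun p => PySem.Int.mod (p.1 + p.2) 2)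
      else acc)
    (List.replicate (PySem.List.pyGetD matrix 0 []).length 0)

-- ===== PRECONDITION & SPEC =====
-- Exactly where the Python A returns (no IndexError): matrix nonempty, and — when there is at
-- least one column — every row indexed by the loop exists and is at least as long as row 0.
def Pre_mult_vector_for_matrix (vec : List Int) (matrix : List (List Int)) : Prop :=
  matrix ≠ [] ∧
  (0 < (matrix.headD []).length →
    vec.length ≤ matrix.length ∧
    ∀ row ∈ matrix.take vec.length, (matrix.headD []).length ≤ row.length)
instance (vec : List Int) (matrix : List (List Int)) : Decidable (Pre_mult_vector_for_matrix vec matrix) := by unfold Pre_mult_vector_for_matrix; infer_instance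
def pvWitness_mult_vector_for_matrix : List Int × List (List Int) :=
  ([1, 0, 1], [[1, 0], [1, 1], [0, 1]])
def Spec_mult_vector_for_matrix (vec : List Int) (matrix : List (List Int)) (out : List Int) : Prop := out = mult_vector_for_matrix_alt vec matrix
instance (vec : List Int) (matrix : List (List Int)) (out : List Int) : Decidable (Spec_mult_vector_for_matrix vec matrix out) := by unfold Spec_mult_vector_for_matrix; infer_instance

-- ===== CLAIM =====
def Claim_equal_mult_vector_for_matrix : Prop := ∀ (vec : List Int) (matrix : List (List Int)), Dom_mult_vector_for_matrix vec matrix → Pre_mult_vector_for_matrix vec matrix → Spec_mult_vector_for_matrix vec matrix (mult_vector_for_matrix vec matrix)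

-- ===== LEMMAS AND PROOFS =====

-- A's single accumulation step and its column entry after the first k rows.
def pvStep (vec : List Int) (matrix : List (List Int)) (i j : Nat) (s : Int) : Int :=
  PySem.Int.mod (s + vec.getD i 0 * (matrix.getD i []).getD j 0) 2

def pvEnt (vec : List Int) (matrix : List (List Int)) (k j : Nat) : Int :=
  (List.range k).foldl (fun s i => pvStep vec matrix i j s) 0

lemma pvEnt_succ (vec : List Int) (matrix : List (List Int)) (k j : Nat) :
    pvEnt vec matrix (k + 1) j = pvStep vec matrix k j (pvEnt vec matrix k j) := by
  simp [pvEnt, List.range_succ]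

lemma pvEnt_mod (vec : List Int) (matrix : List (List Int)) (k j : Nat) :
    pvEnt vec matrix k j % 2 = pvEnt vec matrix k j := by
  cases k with
  | zero => simp [pvEnt]
  | succ m =>
    rw [pvEnt_succ, pvStep, PySem.Int.mod_eq_emod_of_pos (by norm_num), Int.emod_emod_of_dvd]
    exact dvd_refl 2

lemma step_odd (s v m : Int) (hv : v % 2 = 1) :
    PySem.Int.mod (s + v * m) 2 = (s + m) % 2 := by
  obtain ⟨t, rfl⟩ : ∃ t, v = 2 * t + 1 := ⟨v / 2, by omega⟩
  rw [PySem.Int.mod_eq_emod_of_pos (by norm_num),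
    show s + (2 * t + 1) * m = s + m + 2 * (t * m) by ring, Int.add_mul_emod_self_left]

lemma step_even (s v m : Int) (hv : v % 2 = 0) (hs : s % 2 = s) :
    PySem.Int.mod (s + v * m) 2 = s := by
  obtain ⟨t, rfl⟩ : ∃ t, v = 2 * t := ⟨v / 2, by omega⟩
  rw [PySem.Int.mod_eq_emod_of_pos (by norm_num),
    show s + 2 * t * m = s + 2 * (t * m) by ring, Int.add_mul_emod_self_left, hs]

-- B's accumulator after folding the first k rows is the column-wise vector of pvEnt k.
lemma pv_inv (vec : List Int) (matrix : List (List Int)) (n : Nat)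
    (hvm : vec.length ≤ matrix.length)
    (hrow : ∀ row ∈ matrix.take vec.length, n ≤ row.length) :
    ∀ k, k ≤ vec.length →
      (((List.zip vec matrix).take k).foldl
        (fun acc vr =>
          if PySem.Int.mod vr.1 2 ≠ 0 then
            (List.zip acc vr.2).map (fun p => PySem.Int.mod (p.1 + p.2) 2)
          else acc)
        (List.replicate n 0))
        = (List.range n).map (fun j => pvEnt vec matrix k j) := by
  intro k
  induction k with
  | zero =>
    intro _
    apply List.ext_getElem <;> simp [pvEnt]
  | succ m ih =>
    intro hk
    have hm : m < vec.length := by omega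
    have hz : m < (List.zip vec matrix).length := by
      simp [List.length_zip]; omega
    rw [List.take_add_one, List.getElem?_eq_getElem hz, List.getElem_zip,
      Option.toList_some, List.foldl_append, ih (by omega)]
    simp only [List.foldl_cons, List.foldl_nil]
    have hmrow : n ≤ (matrix[m]'(by omega)).length := by
      apply hrow
      rw [List.mem_take_iff_getElem]
      exact ⟨m, by omega, rfl⟩
    have hvget : vec.getD m 0 = vec[m] := by
      simp [List.getD_eq_getElem?_getD, hm]
    have hmget : matrix.getD m [] = matrix[m]'(by omega) := by
      simp [List.getD_eq_getElem?_getD, (by omega : m < matrix.length)]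
    by_cases hodd : PySem.Int.mod (vec[m]) 2 ≠ 0
    · rw [if_pos hodd]
      have hv1 : vec[m] % 2 = 1 := by
        rw [PySem.Int.mod_eq_emod_of_pos (by norm_num)] at hodd
        omega
      apply List.ext_getElem
      · simp [List.length_zip, Nat.min_eq_left hmrow]
      · intro j h1 h2
        simp only [List.length_map, List.length_range] at h2
        simp only [List.getElem_map, List.getElem_zip, List.getElem_range]
        rw [pvEnt_succ, pvStep, hvget, hmget, step_odd _ _ _ hv1,
          PySem.Int.mod_eq_emod_of_pos (by norm_num)]
        congr 3
        have hj : j < (matrix[m]'(by omega)).length := by omega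
        simp [List.getD_eq_getElem?_getD, hj]
    · rw [if_neg hodd]
      rw [ne_eq, not_not] at hodd
      have hv0 : vec[m] % 2 = 0 := by
        rwa [PySem.Int.mod_eq_emod_of_pos (by norm_num)] at hodd
      apply List.ext_getElem
      · simp
      · intro j h1 h2
        simp only [List.length_map, List.length_range] at h1
        simp only [List.getElem_map, List.getElem_range]
        rw [pvEnt_succ, pvStep, hvget, step_even _ _ _ hv0 (pvEnt_mod vec matrix m j)]

-- With no columns, B's fold keeps the empty accumulator.
lemma pv_empty (l : List (Int × List Int)) :
    l.foldl
      (fun acc vr =>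
        if PySem.Int.mod vr.1 2 ≠ 0 then
          (List.zip acc vr.2).map (fun p => PySem.Int.mod (p.1 + p.2) 2)
        else acc)
      ([] : List Int) = [] := by
  induction l with
  | nil => rfl
  | cons x xs ih => simp only [List.foldl_cons]; split_ifs <;> simpa using ih

-- ===== VERDICT =====
theorem mult_vector_for_matrix_spec : Claim_equal_mult_vector_for_matrix := by
  intro vec matrix _ hpre
  obtain ⟨hne, hcond⟩ := hpre
  unfold Spec_mult_vector_for_matrix mult_vector_for_matrix mult_vector_for_matrix_alt
  have hA : (PySem.List.pyRange 0 ((PySem.List.pyGetD matrix 0 []).length : Int) 1).foldl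
      (fun res_vec j =>
        res_vec ++ [(PySem.List.pyRange 0 (vec.length : Int) 1).foldl
          (fun sum_ceil i =>
            PySem.Int.mod (sum_ceil + PySem.List.pyGetD vec i 0 *
              PySem.List.pyGetD (PySem.List.pyGetD matrix i []) j 0) 2) 0])
      []
      = (List.range (PySem.List.pyGetD matrix 0 []).length).map
          (fun j => pvEnt vec matrix vec.length j) := by
    simp only [PySem.List.pyRange_zero_nat, List.foldl_map, PySem.List.pyGetD_natCast]
    rw [PySem.List.foldl_append_singleton_eq_map, List.nil_append]
    apply List.map_congr_left
    intro j _
    simp [pvEnt, pvStep]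
  rw [hA]
  have hhead : (matrix.headD []) = matrix.getD 0 [] := by
    cases matrix with
    | nil => rfl
    | cons a l => rfl
  rw [show (PySem.List.pyGetD matrix 0 [] : List Int) = matrix.getD 0 [] from
    PySem.List.pyGetD_zero matrix []]
  by_cases hn : 0 < (matrix.headD []).length
  · obtain ⟨hvm, hrow⟩ := hcond hn
    rw [hhead] at hrow
    have := pv_inv vec matrix (matrix.getD 0 []).length hvm hrow vec.length (le_refl _)
    rw [List.take_of_length_le (by rw [List.length_zip]; omega)] at this
    rw [this]
  · have h0 : (matrix.getD 0 []).length = 0 := by rw [← hhead]; omega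
    rw [h0]
    simp only [List.replicate_zero, List.range_zero, List.map_nil]
    exact (pv_empty _).symm
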